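-- pv_equiv track=rewrite | github.com/leesunyong/BaekJoon | 1~10000/1107/solution.py | solution
-- ===== SOURCE A (Python) =====
-- def solution(N, M, broken):
--     if len(str(N)) >= abs(100 - N): return abs(100 - N)
--
--     idx = 0
--     while True:
--         dN = [-idx, idx]
--
--         channel = ''
--         for i in dN:
--             find = False
--             if N + i < 0: continue
--             for c in str(N + i):
--                 find = int(c) in broken
--                 if find: break
--
--             if not find:
--                 channel = str(N + i)
--                 break
--
--         if N - idx == 100 or N + idx == 100 : return idx
--         elif channel == '': idx += 1
--         else : return len(channel) + idx
-- ===== SOURCE B (Python) =====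
-- def solution(N, M, broken):
--     # Same answer as the ring search, computed as two independent bounded directional
--     # scans (downward first, then an upward scan capped by the downward distance).
--     L = abs(100 - N)
--     if len(str(N)) >= L:
--         return L
--     bad = set(broken)
--
--     def ok(c):
--         return all(int(ch) not in bad for ch in str(c))
--
--     dd = None
--     c = N
--     while c >= 0 and N - c < L:
--         if ok(c):
--             dd = N - c
--             break
--         c -= 1
--
--     cap = dd if dd is not None else L
--     du = None
--     c = max(N, 0)
--     while c - N < cap:
--         if ok(c):
--             du = c - N
--             break
--         c += 1
--
--     if du is not None:
--         return len(str(N + du)) + du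
--     if dd is not None:
--         return len(str(N - dd)) + dd
--     return L
-- ===== Notes on version B (the rewrite author's own statement) =====
-- stated objective: alternative
-- what changed: Replaces the interleaved expanding-ring search (while True over idx with per-idx [-idx,idx] candidate list, in-loop '== 100' stop test and string sentinel) by two independent bounded directional scans: one downward scan finds the nearest reachable channel below N, then one upward scan capped by that distance, and the answer is assembled arithmetically from the two optional distances.
import Mathlib
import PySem

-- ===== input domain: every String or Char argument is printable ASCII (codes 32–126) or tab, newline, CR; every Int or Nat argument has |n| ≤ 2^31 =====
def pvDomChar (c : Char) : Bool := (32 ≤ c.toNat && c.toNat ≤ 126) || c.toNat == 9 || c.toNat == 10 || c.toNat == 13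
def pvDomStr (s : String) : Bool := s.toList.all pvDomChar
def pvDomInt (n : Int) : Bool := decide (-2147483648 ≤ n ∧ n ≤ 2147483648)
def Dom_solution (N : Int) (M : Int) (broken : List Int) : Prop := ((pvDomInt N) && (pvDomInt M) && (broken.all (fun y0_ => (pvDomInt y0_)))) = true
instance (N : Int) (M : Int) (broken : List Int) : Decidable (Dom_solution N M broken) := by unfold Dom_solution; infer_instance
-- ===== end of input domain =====

-- B replaces A's interleaved expanding-ring channel search by two independent bounded
-- directional scans (downward, then upward capped by the downward distance); alternative
-- decomposition, same exact return value.


-- ===== PORT A =====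
-- inner loop "for c in str(N + i): find = int(c) in broken; if find: break"; after the loop,
-- find = true iff some digit of str(N + i) is in broken.  int(c) is PySem.Int.ofChars? [c]
-- (exact here: str(N + i) with N + i ≥ 0 is plain digits, so int(c) never raises; .getD 0 is
-- only a type-level default on the unreachable none)
def pvFindA (broken : List Int) : List Char → Bool
  | [] => false
  | ch :: rest =>
    if ((PySem.Int.ofChars? [ch]).getD 0) ∈ broken then true else pvFindA broken rest

-- "for i in dN: … if not find: channel = str(N + i); break"
def pvChanA (N : Int) (broken : List Int) : List Int → String
  | [] => ""
  | i :: rest =>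
    if N + i < 0 then pvChanA N broken rest
    else if pvFindA broken (PySem.Int.toChars (N + i)) then pvChanA N broken rest
    else PySem.Int.toStr (N + i)

-- the "while True" loop; fuel |100-N|+1 is an upper bound on its iteration count (the
-- "N - idx == 100 or N + idx == 100" check fires at idx = |100-N| at the latest), so the
-- fuel-0 branch is unreachable
def pvLoopA (N : Int) (broken : List Int) : Nat → Int → Int
  | 0, _ => 0
  | fuel+1, idx =>
    let channel := pvChanA N broken [-idx, idx]
    if N - idx = 100 ∨ N + idx = 100 then idx
    else if channel = "" then pvLoopA N broken fuel (idx + 1)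
    else PySem.Str.len channel + idx

def solution (N : Int) (M : Int) (broken : List Int) : Int :=
  if |100 - N| ≤ PySem.Str.len (PySem.Int.toStr N) then |100 - N|
  else pvLoopA N broken ((100 - N).natAbs + 1) 0

-- ===== PORT B =====
-- ok(c) = all(int(ch) not in bad for ch in str(c))
def pvOkB (bad : List Int) (c : Int) : Bool :=
  (PySem.Int.toChars c).all (fun ch => !decide (((PySem.Int.ofChars? [ch]).getD 0) ∈ bad))

-- downward scan "while c >= 0 and N - c < L: …", returning dd (None = none); the guard
-- bounds the iteration count by L+1, so fuel L.toNat+1 makes the fuel-0 branch unreachable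
def pvDownB (N L : Int) (bad : List Int) : Nat → Int → Option Int
  | 0, _ => none
  | fuel+1, c =>
    if 0 ≤ c ∧ N - c < L then
      if pvOkB bad c then some (N - c) else pvDownB N L bad fuel (c - 1)
    else none

-- upward scan "while c - N < cap: …", returning du; iteration count ≤ cap+1
def pvUpB (N cap : Int) (bad : List Int) : Nat → Int → Option Int
  | 0, _ => none
  | fuel+1, c =>
    if c - N < cap then
      if pvOkB bad c then some (c - N) else pvUpB N cap bad fuel (c + 1)
    else none

def pvSearchB (N : Int) (broken : List Int) : Int :=
  let L := |100 - N|
  let bad := PySem.Set.ofList broken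
  let dd := pvDownB N L bad (L.toNat + 1) N
  let cap := dd.getD L
  let du := pvUpB N cap bad (cap.toNat + 1) (max N 0)
  match du with
  | some d => PySem.Str.len (PySem.Int.toStr (N + d)) + d
  | none =>
    match dd with
    | some d => PySem.Str.len (PySem.Int.toStr (N - d)) + d
    | none => L

def solution_alt (N : Int) (M : Int) (broken : List Int) : Int :=
  if |100 - N| ≤ PySem.Str.len (PySem.Int.toStr N) then |100 - N|
  else pvSearchB N broken

-- ===== PRECONDITION & SPEC =====
def Spec_solution (N : Int) (M : Int) (broken : List Int) (out : Int) : Prop := out = solution_alt N M broken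
instance (N : Int) (M : Int) (broken : List Int) (out : Int) : Decidable (Spec_solution N M broken out) := by unfold Spec_solution; infer_instance

-- ===== CLAIM (what is proved, stated in full; the proofs are below) =====
def Claim_equal_solution : Prop := ∀ (N : Int) (M : Int) (broken : List Int), Dom_solution N M broken → Spec_solution N M broken (solution N M broken)

-- ===== LEMMAS AND PROOFS =====

-- "channel c is reachable downward/upward": nonnegative and no digit broken
def pvGood (broken : List Int) (c : Int) : Prop :=
  0 ≤ c ∧ pvFindA broken (PySem.Int.toChars c) = false

lemma pvOkB_eq_list (broken : List Int) (l : List Char) :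
    (l.all (fun ch => !decide (((PySem.Int.ofChars? [ch]).getD 0) ∈ PySem.Set.ofList broken)))
      = !pvFindA broken l := by
  induction l with
  | nil => simp [pvFindA]
  | cons ch rest ih =>
    have hmem : decide (((PySem.Int.ofChars? [ch]).getD 0) ∈ PySem.Set.ofList broken)
        = decide (((PySem.Int.ofChars? [ch]).getD 0) ∈ broken) := by
      simp [PySem.Set.mem_ofList]
    simp only [List.all_cons, pvFindA, hmem, ih]
    by_cases h : ((PySem.Int.ofChars? [ch]).getD 0) ∈ broken <;> simp [h]

lemma pvOkB_eq (broken : List Int) (c : Int) :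
    pvOkB (PySem.Set.ofList broken) c = !pvFindA broken (PySem.Int.toChars c) := by
  unfold pvOkB; exact pvOkB_eq_list broken _

lemma toDigitsCore_len (fuel n : Nat) (ds : List Char) :
    ds.length ≤ (Nat.toDigitsCore 10 fuel n ds).length := by
  induction fuel generalizing n ds with
  | zero => simp [Nat.toDigitsCore]
  | succ f ih =>
    simp only [Nat.toDigitsCore]
    split
    · simp
    · exact le_trans (by simp) (ih _ _)

lemma toChars_ne_nil (c : Int) : PySem.Int.toChars c ≠ [] := by
  unfold PySem.Int.toChars
  split
  · simp
  · intro h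
    have h1 : 1 ≤ (Nat.toDigits 10 c.toNat).length := by
      unfold Nat.toDigits
      simp only [Nat.toDigitsCore]
      split
      · simp
      · exact le_trans (by simp) (toDigitsCore_len _ _ _)
    rw [h] at h1; simp at h1

lemma toStr_ne_empty (c : Int) : PySem.Int.toStr c ≠ "" := by
  intro h
  apply toChars_ne_nil c
  rw [← PySem.Int.toList_toStr, h]
  rfl

lemma chanA_down (N idx : Int) (broken : List Int) (h : pvGood broken (N - idx)) :
    pvChanA N broken [-idx, idx] = PySem.Int.toStr (N - idx) := by
  obtain ⟨h1, h2⟩ := h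
  unfold pvChanA
  rw [if_neg (by omega : ¬ N + -idx < 0)]
  rw [show N + -idx = N - idx by ring, if_neg (by simp [h2])]

lemma chanA_up (N idx : Int) (broken : List Int) (hd : ¬ pvGood broken (N - idx))
    (h : pvGood broken (N + idx)) :
    pvChanA N broken [-idx, idx] = PySem.Int.toStr (N + idx) := by
  obtain ⟨h1, h2⟩ := h
  unfold pvChanA
  rw [show N + -idx = N - idx by ring]
  by_cases hneg : N - idx < 0
  · rw [if_pos hneg]
    unfold pvChanA
    rw [if_neg (by omega : ¬ N + idx < 0), if_neg (by simp [h2])]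
  · rw [if_neg hneg]
    have hf : pvFindA broken (PySem.Int.toChars (N - idx)) = true := by
      by_contra hx
      exact hd ⟨by omega, by simpa using hx⟩
    rw [if_pos hf]
    unfold pvChanA
    rw [if_neg (by omega : ¬ N + idx < 0), if_neg (by simp [h2])]

lemma chanA_empty (N idx : Int) (broken : List Int) (hd : ¬ pvGood broken (N - idx))
    (hu : ¬ pvGood broken (N + idx)) :
    pvChanA N broken [-idx, idx] = "" := by
  unfold pvChanA
  rw [show N + -idx = N - idx by ring]
  have step2 : ∀ u : Unit, pvChanA N broken [idx] = "" := by
    intro _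
    unfold pvChanA
    by_cases hneg : N + idx < 0
    · rw [if_pos hneg]; rfl
    · rw [if_neg hneg]
      have hf : pvFindA broken (PySem.Int.toChars (N + idx)) = true := by
        by_contra hx
        exact hu ⟨by omega, by simpa using hx⟩
      rw [if_pos hf]; rfl
  by_cases hneg : N - idx < 0
  · rw [if_pos hneg]; exact step2 ()
  · rw [if_neg hneg]
    have hf : pvFindA broken (PySem.Int.toChars (N - idx)) = true := by
      by_contra hx
      exact hd ⟨by omega, by simpa using hx⟩
    rw [if_pos hf]; exact step2 ()

lemma check100 (N idx : Int) (h0 : 0 ≤ idx) (hle : idx ≤ |100 - N|) :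
    ((N - idx = 100 ∨ N + idx = 100) ↔ idx = |100 - N|) := by
  rcases abs_cases (100 - N) with ⟨h1, h2⟩ | ⟨h1, h2⟩ <;> omega

lemma loopA_eq (N : Int) (broken : List Int) (d : Int)
    (h0 : 0 ≤ d) (hdL : d ≤ |100 - N|)
    (hbelow : ∀ j : Int, 0 ≤ j → j < d → ¬ pvGood broken (N - j) ∧ ¬ pvGood broken (N + j))
    (hd : d = |100 - N| ∨ pvGood broken (N - d) ∨ pvGood broken (N + d)) :
    ∀ fuel : Nat, ∀ idx : Int, 0 ≤ idx → idx ≤ d → (d - idx).toNat < fuel →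
      pvLoopA N broken fuel idx =
        (if d = |100 - N| then d
         else PySem.Str.len (pvChanA N broken [-d, d]) + d) := by
  intro fuel
  induction fuel with
  | zero => intro idx _ _ h3; omega
  | succ f ih =>
    intro idx h1 h2 h3
    by_cases hid : idx = d
    · subst hid
      unfold pvLoopA
      by_cases hDL : idx = |100 - N|
      · rw [if_pos ((check100 N idx h1 hdL).mpr hDL), if_pos hDL]
      · rw [if_neg (by rw [check100 N idx h1 hdL]; exact hDL), if_neg hDL]
        rcases hd with h | h | h
        · exact absurd h hDL
        · rw [chanA_down N idx broken h]
          rw [if_neg (toStr_ne_empty _)]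
        · by_cases hdn : pvGood broken (N - idx)
          · rw [chanA_down N idx broken hdn, if_neg (toStr_ne_empty _)]
          · rw [chanA_up N idx broken hdn h, if_neg (toStr_ne_empty _)]
    · have hlt : idx < d := lt_of_le_of_ne h2 hid
      unfold pvLoopA
      obtain ⟨hnd, hnu⟩ := hbelow idx h1 hlt
      rw [if_neg (by rw [check100 N idx h1 (by omega)]; omega)]
      rw [chanA_empty N idx broken hnd hnu, if_pos rfl]
      exact ih (idx + 1) (by omega) (by omega) (by omega)

lemma down_some (N L : Int) (broken : List Int) :
    ∀ fuel : Nat, ∀ c d : Int,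
      pvDownB N L (PySem.Set.ofList broken) fuel c = some d →
      N - c ≤ d ∧ d < L ∧ pvGood broken (N - d) ∧
        ∀ e : Int, N - c ≤ e → e < d → ¬ pvGood broken (N - e) := by
  intro fuel
  induction fuel with
  | zero => intro c d h; simp [pvDownB] at h
  | succ f ih =>
    intro c d h
    unfold pvDownB at h
    split at h
    · rename_i hg
      split at h
      · rename_i hok
        obtain rfl : N - c = d := by injection h
        refine ⟨le_refl _, hg.2, ⟨by omega, ?_⟩, fun e he1 he2 => by omega⟩
        rw [show N - (N - c) = c by ring]
        have := pvOkB_eq broken c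
        rw [hok] at this
        exact (Bool.not_eq_true' _).mp this.symm
      · rename_i hok
        obtain ⟨ha, hb, hc, hall⟩ := ih (c - 1) d h
        refine ⟨by omega, hb, hc, fun e he1 he2 => ?_⟩
        by_cases hec : e = N - c
        · subst hec
          intro hgood
          rw [show N - (N - c) = c by ring] at hgood
          have := pvOkB_eq broken c
          rw [hgood.2] at this
          simp at this
          exact hok this
        · exact hall e (by omega) he2
    · exact absurd h (by simp)

lemma down_none (N L : Int) (broken : List Int) :
    ∀ fuel : Nat, ∀ c : Int, (L - (N - c)).toNat < fuel →
      pvDownB N L (PySem.Set.ofList broken) fuel c = none →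
      ∀ e : Int, N - c ≤ e → e < L → ¬ pvGood broken (N - e) := by
  intro fuel
  induction fuel with
  | zero => intro c h; omega
  | succ f ih =>
    intro c hf h e he1 he2
    unfold pvDownB at h
    split at h
    · rename_i hg
      split at h
      · exact absurd h (by simp)
      · rename_i hok
        by_cases hec : e = N - c
        · subst hec
          intro hgood
          rw [show N - (N - c) = c by ring] at hgood
          have := pvOkB_eq broken c
          rw [hgood.2] at this
          simp at this
          exact hok this
        · exact ih (c - 1) (by omega) h e (by omega) he2
    · rename_i hg
      rw [not_and_or, not_le, not_lt] at hg
      intro hgood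
      have h1 := hgood.1
      rcases hg with hg | hg <;> omega

lemma up_some (N cap : Int) (broken : List Int) :
    ∀ fuel : Nat, ∀ c d : Int, 0 ≤ c →
      pvUpB N cap (PySem.Set.ofList broken) fuel c = some d →
      c - N ≤ d ∧ d < cap ∧ pvGood broken (N + d) ∧
        ∀ e : Int, c - N ≤ e → e < d → ¬ pvGood broken (N + e) := by
  intro fuel
  induction fuel with
  | zero => intro c d _ h; simp [pvUpB] at h
  | succ f ih =>
    intro c d hc0 h
    unfold pvUpB at h
    split at h
    · rename_i hg
      split at h
      · rename_i hok
        obtain rfl : c - N = d := by injection h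
        refine ⟨le_refl _, hg, ⟨by omega, ?_⟩, fun e he1 he2 => by omega⟩
        rw [show N + (c - N) = c by ring]
        have := pvOkB_eq broken c
        rw [hok] at this
        exact (Bool.not_eq_true' _).mp this.symm
      · rename_i hok
        obtain ⟨ha, hb, hc, hall⟩ := ih (c + 1) d (by omega) h
        refine ⟨by omega, hb, hc, fun e he1 he2 => ?_⟩
        by_cases hec : e = c - N
        · subst hec
          intro hgood
          rw [show N + (c - N) = c by ring] at hgood
          have := pvOkB_eq broken c
          rw [hgood.2] at this
          simp at this
          exact hok this
        · exact hall e (by omega) he2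
    · exact absurd h (by simp)

lemma up_none (N cap : Int) (broken : List Int) :
    ∀ fuel : Nat, ∀ c : Int, 0 ≤ c → (cap - (c - N)).toNat < fuel →
      pvUpB N cap (PySem.Set.ofList broken) fuel c = none →
      ∀ e : Int, c - N ≤ e → e < cap → ¬ pvGood broken (N + e) := by
  intro fuel
  induction fuel with
  | zero => intro c _ h; omega
  | succ f ih =>
    intro c hc0 hf h e he1 he2
    unfold pvUpB at h
    split at h
    · rename_i hg
      split at h
      · exact absurd h (by simp)
      · rename_i hok
        by_cases hec : e = c - N
        · subst hec
          intro hgood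
          rw [show N + (c - N) = c by ring] at hgood
          have := pvOkB_eq broken c
          rw [hgood.2] at this
          simp at this
          exact hok this
        · exact ih (c + 1) (by omega) (by omega) h e (by omega) he2
    · rename_i hg
      omega

-- ¬pvGood on a negative channel number
lemma not_good_neg (broken : List Int) (c : Int) (h : c < 0) : ¬ pvGood broken c :=
  fun hg => absurd hg.1 (by omega)

-- ===== VERDICT (by name: the statement is the Claim_ definition above) =====
theorem solution_spec : Claim_equal_solution := by
  intro N M broken _
  unfold Spec_solution solution solution_alt
  by_cases hg : |100 - N| ≤ PySem.Str.len (PySem.Int.toStr N)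
  · rw [if_pos hg, if_pos hg]
  · rw [if_neg hg, if_neg hg]
    unfold pvSearchB
    have hL0 : (0 : Int) ≤ |100 - N| := abs_nonneg _
    have hfuelA : ((100 - N).natAbs + 1 : Nat) = (|100 - N|).toNat + 1 := by
      rcases abs_cases (100 - N) with ⟨h1, _⟩ | ⟨h1, _⟩ <;> rw [h1] <;> omega
    rw [hfuelA]
    set L := |100 - N| with hLdef
    cases hdd : pvDownB N L (PySem.Set.ofList broken) (L.toNat + 1) N with
    | some ddv =>
      obtain ⟨hd1, hd2, hd3, hd4⟩ := down_some N L broken _ N ddv hdd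
      have hddv0 : 0 ≤ ddv := by omega
      simp only [hdd, Option.getD_some]
      cases hdu : pvUpB N ddv (PySem.Set.ofList broken) (ddv.toNat + 1) (max N 0) with
      | some duv =>
        obtain ⟨hu1, hu2, hu3, hu4⟩ :=
          up_some N ddv broken _ (max N 0) duv (le_max_right N 0) hdu
        have hduv0 : 0 ≤ duv := by omega
        rw [loopA_eq N broken duv hduv0 (by omega)
          (fun j hj1 hj2 => ⟨hd4 j (by omega) (by omega),
            by
              by_cases hjc : max N 0 - N ≤ j
              · exact hu4 j hjc hj2
              · exact not_good_neg broken (N + j) (by omega)⟩)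
          (Or.inr (Or.inr hu3)) _ 0 (le_refl 0) hduv0 (by omega)]
        rw [if_neg (by omega), chanA_up N duv broken (hd4 duv (by omega) (by omega)) hu3]
      | none =>
        have hnup := up_none N ddv broken _ (max N 0) (le_max_right N 0) (by omega) hdu
        rw [loopA_eq N broken ddv hddv0 (by omega)
          (fun j hj1 hj2 => ⟨hd4 j (by omega) hj2,
            by
              by_cases hjc : max N 0 - N ≤ j
              · exact hnup j hjc hj2
              · exact not_good_neg broken (N + j) (by omega)⟩)
          (Or.inr (Or.inl hd3)) _ 0 (le_refl 0) hddv0 (by omega)]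
        rw [if_neg (by omega), chanA_down N ddv broken hd3]
    | none =>
      have hndn := down_none N L broken _ N (by omega) hdd
      simp only [hdd, Option.getD_none]
      cases hdu : pvUpB N L (PySem.Set.ofList broken) (L.toNat + 1) (max N 0) with
      | some duv =>
        obtain ⟨hu1, hu2, hu3, hu4⟩ :=
          up_some N L broken _ (max N 0) duv (le_max_right N 0) hdu
        have hduv0 : 0 ≤ duv := by omega
        rw [loopA_eq N broken duv hduv0 (by omega)
          (fun j hj1 hj2 => ⟨hndn j (by omega) (by omega),
            by
              by_cases hjc : max N 0 - N ≤ j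
              · exact hu4 j hjc hj2
              · exact not_good_neg broken (N + j) (by omega)⟩)
          (Or.inr (Or.inr hu3)) _ 0 (le_refl 0) hduv0 (by omega)]
        rw [if_neg (by omega), chanA_up N duv broken (hndn duv (by omega) hu2) hu3]
      | none =>
        have hnup := up_none N L broken _ (max N 0) (le_max_right N 0) (by omega) hdu
        rw [loopA_eq N broken L hL0 (le_refl L)
          (fun j hj1 hj2 => ⟨hndn j (by omega) hj2,
            by
              by_cases hjc : max N 0 - N ≤ j
              · exact hnup j hjc hj2
              · exact not_good_neg broken (N + j) (by omega)⟩)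
          (Or.inl rfl) _ 0 (le_refl 0) hL0 (by omega)]
        rw [if_pos rfl]
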